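/-
  GENERATED by c/gen_frames.py from base_FRAMES.txt, the BASE only (the same in every program) — do not edit; re-run the script when the image is rebuilt.

  The 0 protected frames of the image (functions with address-taken locals), as `Asan.FrameLayout`s, each with the
  proof `…_ok : ….OK` (by evaluation) that the two lemmas of Asan/Stack.lean ask for. For a frame F of a function entered with
  rsp = RA (pointing at the return address): base = RA − F.raOff; the prologue's stores are `storesMem mem (base / 8) F.prologue`,
  the epilogue's `storesMem mem (base / 8) F.epilogue`. The comment on each store is the address of the instruction.
-/
import Asan.Stack
namespace ProgX.Base.Frames
open Asan

/-- The protected frames of the image. -/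
def all : List FrameLayout := []

/-- Every protected frame of the image is well formed. -/
theorem all_ok : ∀ F, F ∈ all → F.OK := by
  intro F hF
  cases hF

end ProgX.Base.Frames
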